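-- pv_equiv track=rewrite | github.com/brleonardo/AoC_2023_solutions | day_09/day_09.py | gen_new_value
-- ===== SOURCE A (Python) =====
-- def gen_new_value(values):
--     if all(v == 0 for v in values[-1]):
--         return values
--
--     current_list = values[len(values)-1]
--     new_data = []
--
--     for i, value in enumerate(current_list):
--         if i+1 < len(current_list):
--             next_value = current_list[i+1]
--             new_data.append(next_value - value)
--
--     values.append(new_data)
--     return gen_new_value(values)
-- ===== SOURCE B (Python) =====
-- def gen_new_value(values):
--     row = values[-1]
--     tail = []
--     while not all(v == 0 for v in row):
--         row = [b - a for a, b in zip(row, row[1:])]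
--         tail.append(row)
--     values.extend(tail)
--     return values
-- ===== Notes on version B (the rewrite author's own statement) =====
-- stated objective: alternative
-- what changed: A recurses on the whole growing table, re-reading values[-1] and rebuilding each row with an enumerate/index loop; B never recurses on the table: it iterates only over the current row, collecting the zip-based difference rows into a separate tail list, and extends values with that tail once at the end.
import Mathlib
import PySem

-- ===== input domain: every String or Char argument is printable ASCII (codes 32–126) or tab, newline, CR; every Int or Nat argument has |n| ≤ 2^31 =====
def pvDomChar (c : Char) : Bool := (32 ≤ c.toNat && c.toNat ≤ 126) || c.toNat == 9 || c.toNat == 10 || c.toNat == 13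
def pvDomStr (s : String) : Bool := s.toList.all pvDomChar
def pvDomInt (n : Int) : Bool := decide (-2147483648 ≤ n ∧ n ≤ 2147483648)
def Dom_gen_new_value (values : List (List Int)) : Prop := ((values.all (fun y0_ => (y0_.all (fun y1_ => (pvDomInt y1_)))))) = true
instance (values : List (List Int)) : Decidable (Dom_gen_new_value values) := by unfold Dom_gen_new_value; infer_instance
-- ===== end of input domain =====

-- B drops A's recursion on the growing table: it iterates on the current row only, collecting
-- the zip-difference rows into a tail list appended once at the end (objective: alternative).
-- Both Pythons mutate `values` in place and return that same object; the equivalence proved is about the return value.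

-- ===== PORT A =====
-- fuel = (length of the last row) + 1 bounds the recursion depth (each appended row is one
-- shorter); it only makes the same computation total, the fuel-0 branch is never reached.
def gen_new_value_go (fuel : Nat) (values : List (List Int)) : List (List Int) :=
  match fuel with
  | 0 => values
  | fuel + 1 =>
    match PySem.List.pyGet? values (-1) with
    | none => values  -- values[-1] raises IndexError on empty `values`: excluded by Pre_
    | some last =>
      if last.all (fun v => v == 0) then values
      else
        let current_list := PySem.List.pyGetD values (PySem.List.len values - 1) []
        let new_data := (PySem.List.enumerate current_list).foldl
          (fun acc p => if p.1 + 1 < PySem.List.len current_list then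
              acc ++ [PySem.List.pyGetD current_list (p.1 + 1) 0 - p.2] else acc) []
        gen_new_value_go fuel (values ++ [new_data])

def gen_new_value (values : List (List Int)) : List (List Int) :=
  gen_new_value_go (((PySem.List.pyGet? values (-1)).getD []).length + 1) values

-- ===== PORT B =====
-- the while loop over `row` collecting difference rows into `tail`; recursion is on the row
-- alone, never on the table (same fuel bound, making the loop total; never reached)
def gen_new_value_tail (fuel : Nat) (row : List Int) : List (List Int) :=
  match fuel with
  | 0 => []
  | fuel + 1 =>
    if row.all (fun v => v == 0) then []
    else
      let row' := (row.zip (row.drop 1)).map (fun p => p.2 - p.1)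
      row' :: gen_new_value_tail fuel row'

def gen_new_value_alt (values : List (List Int)) : List (List Int) :=
  match PySem.List.pyGet? values (-1) with
  | none => values  -- row = values[-1] raises IndexError on empty `values`: excluded by Pre_
  | some row => values ++ gen_new_value_tail (row.length + 1) row

-- ===== PRECONDITION & SPEC =====
-- Pre_ excludes only the empty list, on which both Pythons raise IndexError at values[-1].
def Pre_gen_new_value (values : List (List Int)) : Prop := values ≠ []
instance (values : List (List Int)) : Decidable (Pre_gen_new_value values) := by unfold Pre_gen_new_value; infer_instance
def pvWitness_gen_new_value : List (List Int) := [[1, 3, 6, 10]]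
def Spec_gen_new_value (values : List (List Int)) (out : List (List Int)) : Prop := out = gen_new_value_alt values
instance (values : List (List Int)) (out : List (List Int)) : Decidable (Spec_gen_new_value values out) := by unfold Spec_gen_new_value; infer_instance

-- ===== CLAIM (what is proved, stated in full; the proofs are below) =====
def Claim_equal_gen_new_value : Prop := ∀ (values : List (List Int)), Dom_gen_new_value values → Pre_gen_new_value values → Spec_gen_new_value values (gen_new_value values)

-- ===== LEMMAS AND PROOFS =====

-- A's enumerate/index loop body builds exactly B's zip-difference row:
theorem pvNewDataA_eq (xs : List Int) :
    (PySem.List.enumerate xs 0).foldl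
      (fun acc p => if p.1 + 1 < PySem.List.len xs then
          acc ++ [PySem.List.pyGetD xs (p.1 + 1) 0 - p.2] else acc) []
      = (xs.zip (xs.drop 1)).map (fun p => p.2 - p.1) := by
  rw [PySem.List.foldl_append_ite]
  have hsplit : PySem.List.enumerate xs 0
      = PySem.List.enumerate (xs.take (xs.length - 1)) 0
        ++ PySem.List.enumerate (xs.drop (xs.length - 1)) (0 + (xs.take (xs.length - 1)).length) := by
    conv_lhs => rw [← List.take_append_drop (xs.length - 1) xs]
    rw [PySem.List.enumerate_append]
  rw [hsplit, List.filter_append]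
  have h1 : (PySem.List.enumerate (xs.take (xs.length - 1)) 0).filter
      (fun p => decide (p.1 + 1 < PySem.List.len xs))
      = PySem.List.enumerate (xs.take (xs.length - 1)) 0 := by
    apply List.filter_eq_self.mpr
    intro p hp
    rcases (PySem.List.mem_enumerate_iff _ _ _).mp hp with ⟨k, hk, rfl⟩
    simp only [List.length_take] at hk
    simp [PySem.List.len_eq]
    omega
  have h2 : (PySem.List.enumerate (xs.drop (xs.length - 1)) (0 + (xs.take (xs.length - 1)).length)).filter
      (fun p => decide (p.1 + 1 < PySem.List.len xs))
      = [] := by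
    apply List.filter_eq_nil_iff.mpr
    intro p hp
    rcases (PySem.List.mem_enumerate_iff _ _ _).mp hp with ⟨k, hk, rfl⟩
    simp only [List.length_drop] at hk
    simp [PySem.List.len_eq, List.length_take]
    omega
  rw [h1, h2, List.append_nil, List.nil_append]
  apply List.ext_getElem
  · simp [PySem.List.length_enumerate, List.length_zip]
  · intro k hk1 hk2
    simp only [List.length_map, PySem.List.length_enumerate, List.length_take] at hk1
    have hk : k < xs.length - 1 := by omega
    simp only [List.getElem_map, PySem.List.getElem_enumerate, List.getElem_zip,
      List.getElem_take, List.getElem_drop]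
    have hidx : (0 : Int) + (k : Int) + 1 = ((k + 1 : Nat) : Int) := by push_cast; ring
    rw [hidx, PySem.List.pyGetD_natCast, List.getD_eq_getElem xs 0 (by omega)]
    simp [Nat.add_comm 1 k]

-- values[len(values)-1] is the (present) last element:
theorem pvGetPenult (values : List (List Int)) (last : List Int)
    (h : PySem.List.pyGet? values (-1) = some last) :
    PySem.List.pyGetD values (PySem.List.len values - 1) [] = last := by
  rw [PySem.List.pyGet?_neg_one] at h
  have hne : values ≠ [] := by rintro rfl; simp at h
  have hlen : 1 ≤ values.length := List.length_pos_iff.mpr hne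
  have hc : PySem.List.len values - 1 = ((values.length - 1 : Nat) : Int) := by
    simp [PySem.List.len_eq]; omega
  rw [hc, PySem.List.pyGetD_natCast, List.getD_eq_getElem values [] (by omega)]
  rw [List.getLast?_eq_some_getLast hne] at h
  rw [← List.getLast_eq_getElem hne]
  exact Option.some_injective _ h

-- A's table recursion equals the table plus B's tail of difference rows:
theorem pvGoEq (fuel : Nat) : ∀ (values : List (List Int)) (last : List Int),
    PySem.List.pyGet? values (-1) = some last →
    gen_new_value_go fuel values = values ++ gen_new_value_tail fuel last := by
  induction fuel with
  | zero => intro values last _; simp [gen_new_value_go, gen_new_value_tail]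
  | succ fuel ih =>
      intro values last h
      rw [gen_new_value_go, gen_new_value_tail, h]
      by_cases hz : (last.all fun v => v == 0) = true
      · simp [hz]
      · simp only [hz, Bool.false_eq_true, if_false]
        rw [pvGetPenult values last h, pvNewDataA_eq]
        rw [ih (values ++ [(last.zip (last.drop 1)).map (fun p => p.2 - p.1)])
              ((last.zip (last.drop 1)).map (fun p => p.2 - p.1))
              (PySem.List.pyGet?_neg_one_append_singleton _ _)]
        simp

-- ===== VERDICT (by name: the statement is the Claim_ definition above) =====
theorem gen_new_value_spec : Claim_equal_gen_new_value := by
  intro values _ hpre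
  unfold Spec_gen_new_value gen_new_value gen_new_value_alt
  cases h : PySem.List.pyGet? values (-1) with
  | none =>
      rw [PySem.List.pyGet?_neg_one] at h
      exact absurd (List.getLast?_eq_none_iff.mp h) hpre
  | some last =>
      simp only [Option.getD_some]
      exact pvGoEq _ values last h
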